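-- pv_equiv track=rewrite | github.com/rebeltechai-rgb/rebel-techai | Rebel Master/Python/rebel_engine.py | _get_asset_group
-- ===== SOURCE A (Python) =====
-- def _get_asset_group(symbol: str) -> str:
--     """Classify symbol into asset group for ML threshold lookup."""
--     s = symbol.upper()
--
--     # Crypto
--     crypto_tokens = ("BTC", "ETH", "XRP", "LTC", "ADA", "DOG", "DOT", "XLM", "SOL",
--                      "AVAX", "AAVE", "BNB", "SAND", "UNI", "XTZ", "BCH", "COMP",
--                      "CRV", "KSM", "LNK", "LRC", "MANA", "SUSHI", "BAT")
--     if any(p in s for p in crypto_tokens):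
--         return "crypto"
--
--     # Indices
--     if any(k in s for k in ("US500", "US30", "US2000", "USTECH", "NAS100", "DAX40",
--                             "SPA35", "UK100", "HK50", "CHINA50", "AUS200", "EU50",
--                             "FRA40", "JPN225", "NETH25", "SWI20", "VIX", "USDINDEX",
--                             "GER40", "IT40", "SGFREE", "CAC40", "EUSTX50", "HSI",
--                             "NK225", "DJ30", "FT100", "SPI200", "S&P", "CN50")):
--         return "indices"
--
--     # Energies
--     if any(k in s for k in ("UKOIL", "USOIL", "BRENT", "WTI", "NATGAS", "OIL", "GAS")):
--         return "energies"
--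
--     # Metals
--     if any(k in s for k in ("XAU", "XAG", "XPT", "XPD", "GOLD", "SILVER", "COPPER")):
--         return "metals"
--
--     # Softs
--     if any(k in s for k in ("COCOA", "COFFEE", "SOYBEAN", "SUGAR", "COTTON", "WHEAT", "CORN")):
--         return "softs"
--
--     # Default to forex
--     return "forex"
-- ===== SOURCE B (Python) =====
-- # B: alternative algorithm — one pass over the symbol's windows (lengths 3-8) looked up in a
-- # token->group table, then a priority scan; trades 75 substring searches for per-window dict lookups.
--
-- _TOKEN_TO_GROUP = {
--     "BTC": "crypto",
--     "ETH": "crypto",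
--     "XRP": "crypto",
--     "LTC": "crypto",
--     "ADA": "crypto",
--     "DOG": "crypto",
--     "DOT": "crypto",
--     "XLM": "crypto",
--     "SOL": "crypto",
--     "AVAX": "crypto",
--     "AAVE": "crypto",
--     "BNB": "crypto",
--     "SAND": "crypto",
--     "UNI": "crypto",
--     "XTZ": "crypto",
--     "BCH": "crypto",
--     "COMP": "crypto",
--     "CRV": "crypto",
--     "KSM": "crypto",
--     "LNK": "crypto",
--     "LRC": "crypto",
--     "MANA": "crypto",
--     "SUSHI": "crypto",
--     "BAT": "crypto",
--     "US500": "indices",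
--     "US30": "indices",
--     "US2000": "indices",
--     "USTECH": "indices",
--     "NAS100": "indices",
--     "DAX40": "indices",
--     "SPA35": "indices",
--     "UK100": "indices",
--     "HK50": "indices",
--     "CHINA50": "indices",
--     "AUS200": "indices",
--     "EU50": "indices",
--     "FRA40": "indices",
--     "JPN225": "indices",
--     "NETH25": "indices",
--     "SWI20": "indices",
--     "VIX": "indices",
--     "USDINDEX": "indices",
--     "GER40": "indices",
--     "IT40": "indices",
--     "SGFREE": "indices",
--     "CAC40": "indices",
--     "EUSTX50": "indices",
--     "HSI": "indices",
--     "NK225": "indices",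
--     "DJ30": "indices",
--     "FT100": "indices",
--     "SPI200": "indices",
--     "S&P": "indices",
--     "CN50": "indices",
--     "UKOIL": "energies",
--     "USOIL": "energies",
--     "BRENT": "energies",
--     "WTI": "energies",
--     "NATGAS": "energies",
--     "OIL": "energies",
--     "GAS": "energies",
--     "XAU": "metals",
--     "XAG": "metals",
--     "XPT": "metals",
--     "XPD": "metals",
--     "GOLD": "metals",
--     "SILVER": "metals",
--     "COPPER": "metals",
--     "COCOA": "softs",
--     "COFFEE": "softs",
--     "SOYBEAN": "softs",
--     "SUGAR": "softs",
--     "COTTON": "softs",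
--     "WHEAT": "softs",
--     "CORN": "softs",
-- }
--
-- _WINDOW_LENGTHS = (3, 4, 5, 6, 7, 8)
--
-- _PRIORITY = ("crypto", "indices", "energies", "metals", "softs")
--
--
-- def _get_asset_group(symbol: str) -> str:
--     """Classify symbol into asset group for ML threshold lookup."""
--     s = symbol.upper()
--     found = set()
--     for i in range(len(s)):
--         for L in _WINDOW_LENGTHS:
--             g = _TOKEN_TO_GROUP.get(s[i:i + L])
--             if g is not None:
--                 found.add(g)
--     for g in _PRIORITY:
--         if g in found:
--             return g
--     return "forex"
-- ===== Notes on version B (the rewrite author's own statement) =====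
-- stated objective: alternative
-- what changed: B inverts the search: instead of A's five unrolled if-blocks running 75 per-token substring searches, it builds a token->group hash table, slides windows of lengths 3-8 over the uppercased symbol once collecting the set of matched groups, and returns the first group in priority order (crypto, indices, energies, metals, softs), defaulting to forex.
import Mathlib
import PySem

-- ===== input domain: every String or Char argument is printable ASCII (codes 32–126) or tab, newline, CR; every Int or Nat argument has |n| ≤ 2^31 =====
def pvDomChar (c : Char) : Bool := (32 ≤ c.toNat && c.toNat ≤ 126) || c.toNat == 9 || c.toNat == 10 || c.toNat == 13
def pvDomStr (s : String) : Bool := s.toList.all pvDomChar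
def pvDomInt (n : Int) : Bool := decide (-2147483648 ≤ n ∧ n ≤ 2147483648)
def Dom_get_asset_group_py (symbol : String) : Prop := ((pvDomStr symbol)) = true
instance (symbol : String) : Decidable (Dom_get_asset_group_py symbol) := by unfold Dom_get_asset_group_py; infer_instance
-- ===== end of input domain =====

-- B is an alternative algorithm: one pass over the symbol's windows (lengths 3..8) looked up in a
-- token->group table plus a priority scan, instead of A's 75 per-token substring searches.

-- ===== PORT A =====
def pvCryptoTokens : List String := ["BTC", "ETH", "XRP", "LTC", "ADA", "DOG", "DOT", "XLM", "SOL", "AVAX", "AAVE", "BNB", "SAND", "UNI", "XTZ", "BCH", "COMP", "CRV", "KSM", "LNK", "LRC", "MANA", "SUSHI", "BAT"]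

def pvIndicesTokens : List String := ["US500", "US30", "US2000", "USTECH", "NAS100", "DAX40", "SPA35", "UK100", "HK50", "CHINA50", "AUS200", "EU50", "FRA40", "JPN225", "NETH25", "SWI20", "VIX", "USDINDEX", "GER40", "IT40", "SGFREE", "CAC40", "EUSTX50", "HSI", "NK225", "DJ30", "FT100", "SPI200", "S&P", "CN50"]

def pvEnergiesTokens : List String := ["UKOIL", "USOIL", "BRENT", "WTI", "NATGAS", "OIL", "GAS"]

def pvMetalsTokens : List String := ["XAU", "XAG", "XPT", "XPD", "GOLD", "SILVER", "COPPER"]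

def pvSoftsTokens : List String := ["COCOA", "COFFEE", "SOYBEAN", "SUGAR", "COTTON", "WHEAT", "CORN"]

def get_asset_group_py (symbol : String) : String :=
  let s := PySem.Str.upper symbol
  if pvCryptoTokens.any (fun p => PySem.Str.isIn p s) then "crypto"
  else if pvIndicesTokens.any (fun k => PySem.Str.isIn k s) then "indices"
  else if pvEnergiesTokens.any (fun k => PySem.Str.isIn k s) then "energies"
  else if pvMetalsTokens.any (fun k => PySem.Str.isIn k s) then "metals"
  else if pvSoftsTokens.any (fun k => PySem.Str.isIn k s) then "softs"
  else "forex"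

-- ===== PORT B =====
def pvTokenToGroup : PySem.Dict String String := PySem.Dict.ofList
  [("BTC", "crypto"),
   ("ETH", "crypto"),
   ("XRP", "crypto"),
   ("LTC", "crypto"),
   ("ADA", "crypto"),
   ("DOG", "crypto"),
   ("DOT", "crypto"),
   ("XLM", "crypto"),
   ("SOL", "crypto"),
   ("AVAX", "crypto"),
   ("AAVE", "crypto"),
   ("BNB", "crypto"),
   ("SAND", "crypto"),
   ("UNI", "crypto"),
   ("XTZ", "crypto"),
   ("BCH", "crypto"),
   ("COMP", "crypto"),
   ("CRV", "crypto"),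
   ("KSM", "crypto"),
   ("LNK", "crypto"),
   ("LRC", "crypto"),
   ("MANA", "crypto"),
   ("SUSHI", "crypto"),
   ("BAT", "crypto"),
   ("US500", "indices"),
   ("US30", "indices"),
   ("US2000", "indices"),
   ("USTECH", "indices"),
   ("NAS100", "indices"),
   ("DAX40", "indices"),
   ("SPA35", "indices"),
   ("UK100", "indices"),
   ("HK50", "indices"),
   ("CHINA50", "indices"),
   ("AUS200", "indices"),
   ("EU50", "indices"),
   ("FRA40", "indices"),
   ("JPN225", "indices"),
   ("NETH25", "indices"),
   ("SWI20", "indices"),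
   ("VIX", "indices"),
   ("USDINDEX", "indices"),
   ("GER40", "indices"),
   ("IT40", "indices"),
   ("SGFREE", "indices"),
   ("CAC40", "indices"),
   ("EUSTX50", "indices"),
   ("HSI", "indices"),
   ("NK225", "indices"),
   ("DJ30", "indices"),
   ("FT100", "indices"),
   ("SPI200", "indices"),
   ("S&P", "indices"),
   ("CN50", "indices"),
   ("UKOIL", "energies"),
   ("USOIL", "energies"),
   ("BRENT", "energies"),
   ("WTI", "energies"),
   ("NATGAS", "energies"),
   ("OIL", "energies"),
   ("GAS", "energies"),
   ("XAU", "metals"),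
   ("XAG", "metals"),
   ("XPT", "metals"),
   ("XPD", "metals"),
   ("GOLD", "metals"),
   ("SILVER", "metals"),
   ("COPPER", "metals"),
   ("COCOA", "softs"),
   ("COFFEE", "softs"),
   ("SOYBEAN", "softs"),
   ("SUGAR", "softs"),
   ("COTTON", "softs"),
   ("WHEAT", "softs"),
   ("CORN", "softs")]

def pvWindowLengths : List Int := [3, 4, 5, 6, 7, 8]

def pvPriority : List String := ["crypto", "indices", "energies", "metals", "softs"]

-- 'for g in _PRIORITY: if g in found: return g / return "forex"'
def pvScanPriority (found : PySem.Set String) : List String → String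
  | [] => "forex"
  | g :: rest => if g ∈ found then g else pvScanPriority found rest

-- the two nested 'for' loops building the set 'found'
def pvFound (s : String) : PySem.Set String :=
  (PySem.List.pyRange 0 (PySem.Str.len s) 1).foldl (fun acc i =>
    pvWindowLengths.foldl (fun acc2 L =>
      match pvTokenToGroup.get? (PySem.Str.slice s (some i) (some (i + L))) with
      | some g => PySem.Set.add acc2 g
      | none => acc2) acc) PySem.Set.empty

def get_asset_group_py_alt (symbol : String) : String :=
  let s := PySem.Str.upper symbol
  pvScanPriority (pvFound s) pvPriority

-- ===== PRECONDITION & SPEC =====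
def Spec_get_asset_group_py (symbol : String) (out : String) : Prop := out = get_asset_group_py_alt symbol
instance (symbol : String) (out : String) : Decidable (Spec_get_asset_group_py symbol out) := by unfold Spec_get_asset_group_py; infer_instance

-- ===== CLAIM (what is proved, stated in full; the proofs are below) =====
def Claim_equal_get_asset_group_py : Prop := ∀ (symbol : String), Dom_get_asset_group_py symbol → Spec_get_asset_group_py symbol (get_asset_group_py symbol)

-- ===== LEMMAS AND PROOFS =====

-- membership in the inner window-length fold
theorem pv_mem_foldl_get (f : Int → Option String) (Ls : List Int) (acc : List String) (g : String) :
    g ∈ Ls.foldl (fun a L => match f L with | some h => PySem.Set.add a h | none => a) acc ↔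
      g ∈ acc ∨ ∃ L ∈ Ls, f L = some g := by
  induction Ls generalizing acc with
  | nil => simp
  | cons L Ls ih =>
    simp only [List.foldl_cons]
    cases hfL : f L with
    | none =>
      rw [ih]
      constructor
      · rintro (h | ⟨L', hL', h⟩)
        · exact Or.inl h
        · exact Or.inr ⟨L', List.mem_cons_of_mem _ hL', h⟩
      · rintro (h | ⟨L', hL', h⟩)
        · exact Or.inl h
        · rcases List.mem_cons.mp hL' with rfl | hL'
          · rw [hfL] at h; cases h
          · exact Or.inr ⟨L', hL', h⟩
    | some h0 =>
      rw [ih]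
      constructor
      · rintro (hmem | ⟨L', hL', h⟩)
        · rcases (PySem.Set.mem_add _ _ _).mp hmem with hmem | rfl
          · exact Or.inl hmem
          · exact Or.inr ⟨L, List.mem_cons_self .., by rw [hfL]⟩
        · exact Or.inr ⟨L', List.mem_cons_of_mem _ hL', h⟩
      · rintro (hmem | ⟨L', hL', h⟩)
        · exact Or.inl ((PySem.Set.mem_add _ _ _).mpr (Or.inl hmem))
        · rcases List.mem_cons.mp hL' with rfl | hL'
          · rw [hfL] at h; injection h with h
            exact Or.inl ((PySem.Set.mem_add _ _ _).mpr (Or.inr h.symm))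
          · exact Or.inr ⟨L', hL', h⟩

-- membership in the outer fold
theorem pv_mem_foldl2 (f : Int → Int → Option String) (xs : List Int) (acc : List String) (g : String) :
    g ∈ xs.foldl (fun a i =>
        pvWindowLengths.foldl (fun a2 L => match f i L with | some h => PySem.Set.add a2 h | none => a2) a) acc ↔
      g ∈ acc ∨ ∃ i ∈ xs, ∃ L ∈ pvWindowLengths, f i L = some g := by
  induction xs generalizing acc with
  | nil => simp
  | cons i xs ih =>
    simp only [List.foldl_cons]
    rw [ih, pv_mem_foldl_get]
    constructor
    · rintro ((h | ⟨L, hL, h⟩) | ⟨i', hi', h⟩)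
      · exact Or.inl h
      · exact Or.inr ⟨i, List.mem_cons_self .., L, hL, h⟩
      · exact Or.inr ⟨i', List.mem_cons_of_mem _ hi', h⟩
    · rintro (h | ⟨i', hi', L, hL, h⟩)
      · exact Or.inl (Or.inl h)
      · rcases List.mem_cons.mp hi' with rfl | hi'
        · exact Or.inl (Or.inr ⟨L, hL, h⟩)
        · exact Or.inr ⟨i', hi', L, hL, h⟩

theorem pv_mem_found_iff (s : String) (g : String) :
    g ∈ pvFound s ↔ ∃ i ∈ PySem.List.pyRange 0 (PySem.Str.len s) 1, ∃ L ∈ pvWindowLengths,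
      pvTokenToGroup.get? (PySem.Str.slice s (some i) (some (i + L))) = some g := by
  unfold pvFound
  rw [pv_mem_foldl2 (fun i L => pvTokenToGroup.get? (PySem.Str.slice s (some i) (some (i + L))))]
  simp [PySem.Set.empty]

-- every key of the table has length 3..8 (and is nonempty)
set_option maxRecDepth 40000 in
theorem pv_token_lens : ∀ p ∈ pvTokenToGroup.items, ((p.1.toList.length : Int) ∈ pvWindowLengths ∧ p.1.toList ≠ []) := by
  decide

-- the set 'found' contains g iff some token mapped to g occurs in s
theorem pv_found_iff_token (s : String) (g : String) :
    g ∈ pvFound s ↔ ∃ t, pvTokenToGroup.get? t = some g ∧ PySem.Str.isIn t s = true := by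
  rw [pv_mem_found_iff]
  constructor
  · rintro ⟨i, hi, L, hL, hget⟩
    refine ⟨_, hget, ?_⟩
    rcases (PySem.List.mem_pyRange_one).mp hi with ⟨hi0, hilt⟩
    have hL0 : (0:Int) ≤ L := by
      have hL' : L = 3 ∨ L = 4 ∨ L = 5 ∨ L = 6 ∨ L = 7 ∨ L = 8 := by
        simpa [pvWindowLengths] using hL
      omega
    have hiL : (0:Int) ≤ i + L := by omega
    rw [PySem.Str.isIn_eq]
    rw [← PySem.Chars.exists_prefix_drop_iff_isIn]
    refine ⟨i.toNat, ?_⟩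
    have htl : (PySem.Str.slice s (some i) (some (i + L))).toList
        = (s.toList.drop i.toNat).take ((i + L).toNat - i.toNat) := by
      rw [PySem.Str.toList_slice, PySem.Chars.slice_eq_listSlice, PySem.List.slice_toNat _ hi0 hiL]
    rw [htl]
    exact List.take_prefix _ _
  · rintro ⟨t, hget, hin⟩
    have hitems := PySem.Dict.mem_items_of_get?_eq_some _ hget
    have hlen := pv_token_lens _ hitems
    rw [PySem.Str.isIn_eq, ← PySem.Chars.exists_prefix_drop_iff_isIn] at hin
    obtain ⟨j, hpre⟩ := hin
    have hne : t.toList ≠ [] := hlen.2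
    have hjlt : j < s.toList.length := by
      by_contra hj
      rw [not_lt] at hj
      rw [List.drop_eq_nil_of_le hj] at hpre
      exact hne (List.prefix_nil.mp hpre)
    refine ⟨(j : Int), ?_, (t.toList.length : Int), hlen.1, ?_⟩
    · rw [PySem.List.mem_pyRange_one]
      constructor
      · exact_mod_cast Nat.zero_le j
      · simp only [PySem.Str.len_eq]
        exact_mod_cast hjlt
    · have hslice : (PySem.Str.slice s (some (j : Int)) (some ((j : Int) + (t.toList.length : Int)))).toList = t.toList := by
        rw [PySem.Str.toList_slice, PySem.Chars.slice_eq_listSlice, PySem.List.slice_natCast_add]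
        exact ((List.prefix_iff_eq_take.mp hpre).symm)
      have : PySem.Str.slice s (some (j : Int)) (some ((j : Int) + (t.toList.length : Int))) = t := by
        exact String.toList_injective hslice
      rw [this]
      exact hget

-- tokens of a group match the table exactly
theorem pv_group_iff (s : String) (g : String) (toks : List String)
    (h1 : ∀ t ∈ toks, pvTokenToGroup.get? t = some g)
    (h2 : ∀ p ∈ pvTokenToGroup.items, p.2 = g → p.1 ∈ toks) :
    (toks.any (fun t => PySem.Str.isIn t s) = true) ↔ g ∈ pvFound s := by
  rw [pv_found_iff_token, List.any_eq_true]
  constructor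
  · rintro ⟨t, ht, hin⟩
    exact ⟨t, h1 t ht, hin⟩
  · rintro ⟨t, hget, hin⟩
    have hitems := PySem.Dict.mem_items_of_get?_eq_some _ hget
    exact ⟨t, h2 _ hitems rfl, hin⟩

set_option maxRecDepth 100000 in
set_option maxHeartbeats 1000000 in
theorem pv_main (symbol : String) : get_asset_group_py symbol = get_asset_group_py_alt symbol := by
  unfold get_asset_group_py get_asset_group_py_alt
  have hc := pv_group_iff (PySem.Str.upper symbol) "crypto" pvCryptoTokens (by decide) (by decide)
  have hi := pv_group_iff (PySem.Str.upper symbol) "indices" pvIndicesTokens (by decide) (by decide)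
  have he := pv_group_iff (PySem.Str.upper symbol) "energies" pvEnergiesTokens (by decide) (by decide)
  have hm := pv_group_iff (PySem.Str.upper symbol) "metals" pvMetalsTokens (by decide) (by decide)
  have hs := pv_group_iff (PySem.Str.upper symbol) "softs" pvSoftsTokens (by decide) (by decide)
  simp only [pvPriority, pvScanPriority]
  by_cases h1 : pvCryptoTokens.any (fun p => PySem.Str.isIn p (PySem.Str.upper symbol)) = true
  · rw [if_pos h1, if_pos (hc.mp h1)]
  · rw [if_neg (by simpa using h1), if_neg (fun hmem => h1 (hc.mpr hmem))]
    by_cases h2 : pvIndicesTokens.any (fun k => PySem.Str.isIn k (PySem.Str.upper symbol)) = true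
    · rw [if_pos h2, if_pos (hi.mp h2)]
    · rw [if_neg (by simpa using h2), if_neg (fun hmem => h2 (hi.mpr hmem))]
      by_cases h3 : pvEnergiesTokens.any (fun k => PySem.Str.isIn k (PySem.Str.upper symbol)) = true
      · rw [if_pos h3, if_pos (he.mp h3)]
      · rw [if_neg (by simpa using h3), if_neg (fun hmem => h3 (he.mpr hmem))]
        by_cases h4 : pvMetalsTokens.any (fun k => PySem.Str.isIn k (PySem.Str.upper symbol)) = true
        · rw [if_pos h4, if_pos (hm.mp h4)]
        · rw [if_neg (by simpa using h4), if_neg (fun hmem => h4 (hm.mpr hmem))]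
          by_cases h5 : pvSoftsTokens.any (fun k => PySem.Str.isIn k (PySem.Str.upper symbol)) = true
          · rw [if_pos h5, if_pos (hs.mp h5)]
          · rw [if_neg (by simpa using h5), if_neg (fun hmem => h5 (hs.mpr hmem))]

-- ===== VERDICT (by name: the statement is the Claim_ definition above) =====
theorem get_asset_group_py_spec : Claim_equal_get_asset_group_py := by
  intro symbol _
  unfold Spec_get_asset_group_py
  exact pv_main symbol
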